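-- pv_equiv track=rewrite | github.com/wajdialjedaani/A11yPDF | portal/views.py | prepare_data_for_excel
-- ===== SOURCE A (Python) =====
-- def prepare_data_for_excel(combined_data):
--     # Create a list of dictionaries, each representing a page and its analysis
--     pages_data = []
--     for i, page_number in enumerate(combined_data['page number']):
--         page_data = {'page number': page_number}
--         for analysis_type in combined_data:
--             if analysis_type != 'page number':  # Exclude the 'page number' list
--                 # Ensure there is data for the current page; if not, append None or an appropriate placeholder
--                 page_data[analysis_type] = combined_data[analysis_type][i] if i < len(
--                     combined_data[analysis_type]) else None
--         pages_data.append(page_data)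
--
--     # Sort the list of dictionaries by 'page number'
--     sorted_pages_data = sorted(pages_data, key=lambda x: x['page number'])
--
--     return sorted_pages_data
-- ===== SOURCE B (Python) =====
-- def prepare_data_for_excel(combined_data):
--     # Group-by instead of sort: bucket each row under its page number in a
--     # dict, then concatenate the buckets in increasing order of the distinct
--     # page numbers (buckets keep input order, so ties stay stable).
--     pages = combined_data['page number']
--     others = [(k, v) for k, v in combined_data.items() if k != 'page number']
--     buckets = {}
--     for i, pn in enumerate(pages):
--         row = {'page number': pn}
--         for k, v in others:
--             row[k] = v[i] if i < len(v) else None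
--         buckets[pn] = buckets.get(pn, []) + [row]
--     return [row for pn in sorted(buckets) for row in buckets[pn]]
-- ===== Notes on version B (the rewrite author's own statement) =====
-- stated objective: alternative
-- what changed: B replaces the comparison sort of the built row dicts by a group-by: rows are bucketed in a dict keyed by page number as they are built, and the buckets are concatenated in increasing order of the distinct page numbers (only the distinct keys are sorted; bucket order keeps ties stable).
import Mathlib
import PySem

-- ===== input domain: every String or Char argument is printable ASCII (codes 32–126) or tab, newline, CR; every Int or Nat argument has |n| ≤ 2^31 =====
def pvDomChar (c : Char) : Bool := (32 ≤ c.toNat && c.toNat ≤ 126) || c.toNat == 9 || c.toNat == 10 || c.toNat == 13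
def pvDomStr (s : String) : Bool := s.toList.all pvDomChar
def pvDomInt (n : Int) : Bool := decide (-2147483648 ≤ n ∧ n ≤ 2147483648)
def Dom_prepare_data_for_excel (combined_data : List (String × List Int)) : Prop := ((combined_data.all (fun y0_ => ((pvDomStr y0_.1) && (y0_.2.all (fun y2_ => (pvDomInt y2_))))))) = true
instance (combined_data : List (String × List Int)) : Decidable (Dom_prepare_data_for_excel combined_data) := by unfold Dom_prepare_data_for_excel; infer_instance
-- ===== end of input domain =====

-- B replaces the sort of the built row dicts by a group-by: rows are bucketed
-- under their page number and the buckets are concatenated in increasing order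
-- of the distinct page numbers; same result, a different algorithm.

-- ===== PORT A =====
-- one page_data dict of A: starts {'page number': pn}, then appends each other
-- column's entry in dict order (keys are distinct, so dict insert = append)
def pvRowA (cols : PySem.Dict String (List Int)) (i : Int) (pn : Int) : List (String × Option Int) :=
  cols.items.foldl
    (fun row kv => if kv.1 != "page number" then row ++ [(kv.1, PySem.List.pyGet? kv.2 i)] else row)
    [("page number", some pn)]

-- A's sort key x['page number']: first match in the row; the defaults are
-- unreachable since every row starts with the 'page number' entry
def pvKeyA (row : List (String × Option Int)) : Int :=
  ((List.lookup "page number" row).getD none).getD 0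

def prepare_data_for_excel (combined_data : List (String × List Int)) : List (List (String × Option Int)) :=
  let cols := PySem.Dict.ofList combined_data
  let pages := cols.getD "page number" []   -- Pre_ guarantees the key exists (else Python raises KeyError)
  PySem.List.sorted
    ((PySem.List.enumerate pages).foldl (fun acc p => acc ++ [pvRowA cols p.1 p.2]) [])
    pvKeyA false

-- ===== PORT B =====
-- one row of B: {'page number': pn} then the other columns in order
def pvRowB (others : List (String × List Int)) (i : Int) (pn : Int) : List (String × Option Int) :=
  ("page number", some pn) ::
    others.map (fun kv => (kv.1, if i < (kv.2.length : Int) then PySem.List.pyGet? kv.2 i else none))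

def prepare_data_for_excel_alt (combined_data : List (String × List Int)) : List (List (String × Option Int)) :=
  let cols := PySem.Dict.ofList combined_data
  let pages := cols.getD "page number" []   -- Pre_ guarantees the key exists
  let others := cols.items.filter (fun kv => kv.1 != "page number")
  -- buckets[pn] = buckets.get(pn, []) + [row]  (= Dict.modify pn [] (· ++ [row]))
  let buckets := (PySem.List.enumerate pages).foldl
    (fun (b : PySem.Dict Int (List (List (String × Option Int)))) p =>
      b.modify p.2 [] (· ++ [pvRowB others p.1 p.2]))
    PySem.Dict.empty
  (PySem.List.sorted buckets.keys (fun x => x) false).flatMap (fun pn => buckets.getD pn [])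

-- ===== PRECONDITION & SPEC =====
-- Pre_: the dict must contain the 'page number' key; otherwise Python A raises KeyError.
def Pre_prepare_data_for_excel (combined_data : List (String × List Int)) : Prop :=
  "page number" ∈ combined_data.map Prod.fst
instance (combined_data : List (String × List Int)) : Decidable (Pre_prepare_data_for_excel combined_data) := by unfold Pre_prepare_data_for_excel; infer_instance
def pvWitness_prepare_data_for_excel : (List (String × List Int)) :=
  [("page number", [2, 1, 2]), ("errors", [5, 7])]

def Spec_prepare_data_for_excel (combined_data : List (String × List Int)) (out : List (List (String × Option Int))) : Prop := out = prepare_data_for_excel_alt combined_data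
instance (combined_data : List (String × List Int)) (out : List (List (String × Option Int))) : Decidable (Spec_prepare_data_for_excel combined_data out) := by unfold Spec_prepare_data_for_excel; infer_instance

-- ===== CLAIM (what is proved, stated in full; the proofs are below) =====
def Claim_equal_prepare_data_for_excel : Prop := ∀ (combined_data : List (String × List Int)), Dom_prepare_data_for_excel combined_data → Pre_prepare_data_for_excel combined_data → Spec_prepare_data_for_excel combined_data (prepare_data_for_excel combined_data)

-- ===== LEMMAS AND PROOFS =====

-- a fiber of the key: the rows whose key is k, in input order
-- insertBy passes over a prefix it does not insert into
theorem pvInsertBy_pass {α : Type} (cmp : α → α → Bool) (x : α) (l1 l2 : List α)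
    (h : ∀ a ∈ l1, cmp x a = false) :
    PySem.List.insertBy cmp x (l1 ++ l2) = l1 ++ PySem.List.insertBy cmp x l2 := by
  induction l1 with
  | nil => rfl
  | cons a l1 ih =>
    simp [PySem.List.insertBy, h a (List.mem_cons_self ..),
      ih (fun b hb => h b (List.mem_cons_of_mem _ hb))]

-- insertBy puts x in front when it goes before everything
theorem pvInsertBy_front {α : Type} (cmp : α → α → Bool) (x : α) (l : List α)
    (h : ∀ a ∈ l, cmp x a = true) :
    PySem.List.insertBy cmp x l = x :: l := by
  cases l with
  | nil => rfl
  | cons a l => simp [PySem.List.insertBy, h a (List.mem_cons_self ..)]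

theorem pvFib_nil {α : Type} (key : α → Int) (xs : List α) (k : Int)
    (h : k ∉ xs.map key) : xs.filter (fun r => key r == k) = [] := by
  rw [List.filter_eq_nil_iff]
  intro r hr
  simp only [beq_iff_eq]
  exact fun he => h (he ▸ List.mem_map_of_mem hr)

-- pointwise congruence for flatMap
theorem pvFlatMap_congr {a b : Type} (l : List a) (f g : a -> List b)
    (h : forall x, x ∈ l -> f x = g x) : l.flatMap f = l.flatMap g := by
  induction l with
  | nil => rfl
  | cons y l ih =>
    simp only [List.flatMap_cons, h y (List.mem_cons_self ..),
      ih (fun x hx => h x (List.mem_cons_of_mem _ hx))]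

-- inserting x into the fibers over the strictly increasing key list of xs
-- yields the fibers of xs ++ [x] over the key list of xs ++ [x]
theorem pvInsertBy_group {a : Type} (key : a -> Int) (x : a) :
    forall (K : List Int) (xs : List a), K.Pairwise (· < ·) -> key x ∈ K ->
    (forall k, k ∈ K -> k = key x ∨ k ∈ xs.map key) ->
    PySem.List.insertBy (fun p q => decide (key p < key q)) x
        ((K.filter (fun k => decide (k ∈ xs.map key))).flatMap
          (fun k => xs.filter (fun r => key r == k)))
      = K.flatMap (fun k => (xs ++ [x]).filter (fun r => key r == k)) := by
  intro K
  induction K with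
  | nil => intro xs _ hmem _; simp at hmem
  | cons k K' ih =>
    intro xs hp hmem hsub
    rcases List.pairwise_cons.mp hp with ⟨hlt, hp'⟩
    by_cases hkx : k = key x
    · -- the head key is x's key
      have hK' : forall k', k' ∈ K' -> k' ∈ xs.map key := by
        intro k' hk'
        rcases hsub k' (List.mem_cons_of_mem _ hk') with he | hm
        · exact absurd (he.trans hkx.symm) ((hlt k' hk').ne')
        · exact hm
      have hfilK' : K'.filter (fun k => decide (k ∈ xs.map key)) = K' :=
        List.filter_eq_self.mpr (fun p hp'' => decide_eq_true (hK' p hp''))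
      have hall : forall p, p ∈ K'.flatMap (fun k => xs.filter (fun r => key r == k)) ->
          (decide (key x < key p)) = true := by
        intro p hpm
        rcases List.mem_flatMap.mp hpm with ⟨k', hk', hfa⟩
        have hka : key p = k' := by simpa using (List.mem_filter.mp hfa).2
        exact decide_eq_true (hka ▸ (hkx ▸ hlt k' hk'))
      have htail : K'.flatMap (fun k' => (xs ++ [x]).filter (fun r => key r == k'))
          = K'.flatMap (fun k' => xs.filter (fun r => key r == k')) := by
        apply pvFlatMap_congr
        intro k' hk'
        rw [List.filter_append]
        have hxne : ([x].filter (fun r => key r == k')) = [] := by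
          have : key x ≠ k' := hkx ▸ (hlt k' hk').ne
          simp [this]
        rw [hxne, List.append_nil]
      by_cases hmapk : k ∈ xs.map key
      · simp only [List.filter_cons, decide_eq_true hmapk, if_true, hfilK']
        simp only [List.flatMap_cons]
        rw [pvInsertBy_pass _ _ _ _ (fun p hpm => by
          have : key p = k := by simpa using (List.mem_filter.mp hpm).2
          simp [this, hkx])]
        rw [pvInsertBy_front _ _ _ hall, htail, List.filter_append]
        have hx1 : ([x].filter (fun r => key r == k)) = [x] := by simp [hkx.symm]
        rw [hx1]
        simp
      · simp only [List.filter_cons, decide_eq_false hmapk, if_false, Bool.false_eq_true, hfilK']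
        rw [pvInsertBy_front _ _ _ hall]
        simp only [List.flatMap_cons]
        rw [htail, List.filter_append, pvFib_nil key xs k hmapk]
        have hx1 : ([x].filter (fun r => key r == k)) = [x] := by simp [hkx.symm]
        rw [hx1]
        simp
    · -- the head key is below x's key
      have hx' : key x ∈ K' := by
        rcases List.mem_cons.mp hmem with he | hm
        · exact absurd he.symm hkx
        · exact hm
      have hkk : k < key x := hlt _ hx'
      have hkmap : k ∈ xs.map key := by
        rcases hsub k (List.mem_cons_self ..) with he | hm
        · exact absurd he hkx
        · exact hm
      simp only [List.filter_cons, decide_eq_true hkmap, if_true]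
      simp only [List.flatMap_cons]
      rw [pvInsertBy_pass _ _ _ _ (fun p hpm => by
        have : key p = k := by simpa using (List.mem_filter.mp hpm).2
        simp only [this]
        simpa using not_lt_of_gt hkk)]
      rw [ih xs hp' hx' (fun k' hk' => hsub k' (List.mem_cons_of_mem _ hk'))]
      rw [List.filter_append]
      have hxne : ([x].filter (fun r => key r == k)) = [] := by
        have : key x ≠ k := Ne.symm hkx
        simp [this]
      rw [hxne, List.append_nil]

-- a stable sort is the concatenation of the key-fibers over any strictly
-- increasing enumeration of the occurring keys
theorem pvSorted_grouped {a : Type} (key : a -> Int) :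
    forall (xs : List a) (K : List Int), K.Pairwise (· < ·) ->
    (forall k, k ∈ K ↔ k ∈ xs.map key) ->
    PySem.List.sorted xs key false = K.flatMap (fun k => xs.filter (fun r => key r == k)) := by
  intro xs
  induction xs using List.reverseRecOn with
  | nil =>
    intro K _ hmem
    have hK : K = [] := List.eq_nil_iff_forall_not_mem.mpr (fun k hk => by simpa using (hmem k).mp hk)
    subst hK
    rfl
  | append_singleton xs x ih =>
    intro K hp hmem
    rw [PySem.List.sorted_eq_foldl_insertBy, List.foldl_append,
      ← PySem.List.sorted_eq_foldl_insertBy]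
    simp only [List.foldl_cons, List.foldl_nil]
    rw [ih (K.filter (fun k => decide (k ∈ xs.map key)))
      (hp.sublist List.filter_sublist)
      (fun k => ⟨fun hk => of_decide_eq_true (List.mem_filter.mp hk).2,
        fun hk => List.mem_filter.mpr
          ⟨(hmem k).mpr (by simp only [List.map_append, List.mem_append]; exact Or.inl hk),
            decide_eq_true hk⟩⟩)]
    apply pvInsertBy_group key x K xs hp
    · exact (hmem (key x)).mpr (by simp)
    · intro k hk
      have hm := (hmem k).mp hk
      rw [List.map_append] at hm
      rcases List.mem_append.mp hm with h1 | h1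
      · exact Or.inr h1
      · exact Or.inl (by simpa using h1)

theorem pvKeyA_rowB (others : List (String × List Int)) (i : Int) (pn : Int) :
    pvKeyA (pvRowB others i pn) = pn := by
  unfold pvRowB pvKeyA
  simp

theorem pvRowA_eq_rowB (cols : PySem.Dict String (List Int)) (i : Int) (pn : Int) (hi : 0 ≤ i) :
    pvRowA cols i pn = pvRowB (cols.items.filter (fun kv => kv.1 != "page number")) i pn := by
  unfold pvRowA pvRowB
  rw [PySem.List.foldl_append_if]
  simp only [List.singleton_append]
  refine congrArg _ (List.map_congr_left ?_)
  intro kv _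
  by_cases h : i < (kv.2.length : Int)
  · rw [if_pos h]
  · rw [if_neg h]
    have hn : PySem.List.pyGet? kv.2 i = none := by
      rw [PySem.List.pyGet?_of_nonneg (xs := kv.2) hi, List.getElem?_eq_none (by omega)]
    rw [hn]

-- ===== VERDICT (by name: the statement is the Claim_ definition above) =====
theorem prepare_data_for_excel_spec : Claim_equal_prepare_data_for_excel := by
  intro cd _hdom _hpre
  unfold Spec_prepare_data_for_excel
  simp only [prepare_data_for_excel, prepare_data_for_excel_alt]
  generalize PySem.Dict.ofList cd = cols
  generalize cols.getD "page number" [] = pages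
  rw [PySem.List.foldl_append_singleton_eq_map, List.nil_append]
  -- A's rows: replace rowA by rowB (every enumerate index is ≥ 0)
  have hrows : (PySem.List.enumerate pages).map (fun p => pvRowA cols p.1 p.2)
      = (PySem.List.enumerate pages).map
          (fun p => pvRowB (cols.items.filter (fun kv => kv.1 != "page number")) p.1 p.2) := by
    refine List.map_congr_left ?_
    intro p hp
    rcases (PySem.List.mem_enumerate_iff _ _ _).mp hp with ⟨k, hk, rfl⟩
    exact pvRowA_eq_rowB cols _ _ (by simp)
  rw [hrows]
  set others := cols.items.filter (fun kv => kv.1 != "page number") with hothers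
  set buckets := (PySem.List.enumerate pages).foldl
    (fun (b : PySem.Dict Int (List (List (String × Option Int)))) p =>
      b.modify p.2 [] (· ++ [pvRowB others p.1 p.2]))
    PySem.Dict.empty with hbuckets
  -- the buckets' keys are the distinct page numbers in first-occurrence order
  have hkeys : buckets.keys = PySem.Set.ofList pages := by
    rw [hbuckets, PySem.Dict.keys_foldl_modify_key, PySem.Dict.keys_empty,
      PySem.List.map_snd_enumerate]
    rfl
  -- the bucket of k holds the rows whose page number is k, in input order
  have hget : ∀ k, buckets.getD k []
      = ((PySem.List.enumerate pages).filter (fun p => p.2 == k)).map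
          (fun p => pvRowB others p.1 p.2) := by
    intro k
    have hfold : (((PySem.List.enumerate pages).map
          (fun p => (p.2, pvRowB others p.1 p.2))).foldl
            (fun (b : PySem.Dict Int (List (List (String × Option Int)))) q =>
              b.modify q.1 [] (· ++ [q.2])) PySem.Dict.empty) = buckets := by
      rw [List.foldl_map]
    rw [hbuckets] at hfold ⊢
    rw [← hfold,
      PySem.Dict.getD_foldl_modify_append, PySem.Dict.getD_empty, List.nil_append,
      List.filter_map, List.map_map]
    rfl
  -- stable sort = concatenation of fibers over the sorted distinct keys
  rw [pvSorted_grouped pvKeyA _ (PySem.List.sorted (PySem.Set.ofList pages) (fun x => x) false)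
    (PySem.List.sorted_ofList_pairwise_lt pages)
    (by
      intro k
      rw [PySem.List.mem_sorted, PySem.Set.mem_ofList, List.map_map]
      have : (pvKeyA ∘ fun p : Int × Int => pvRowB others p.1 p.2) = (fun p : Int × Int => p.2) := by
        funext p; exact pvKeyA_rowB others p.1 p.2
      rw [this, PySem.List.map_snd_enumerate])]
  rw [hkeys]
  refine pvFlatMap_congr _ _ _ ?_
  intro k _
  rw [hget k, List.filter_map]
  have : ((fun r => pvKeyA r == k) ∘ fun p : Int × Int => pvRowB others p.1 p.2)
      = (fun p : Int × Int => p.2 == k) := by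
    funext p
    simp [pvKeyA_rowB others p.1 p.2]
  rw [this]
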